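-- pv_equiv track=rewrite | github.com/LaurenceYozi/tts_server | infer.py | nsw_idx
-- ===== SOURCE A (Python) =====
-- def nsw_idx(text, non_standard_words):
--     index_dict = {}
--     counter = 0
--     for i in non_standard_words:
--         index = -1
--         # 最多偵測三次位置，可依照需求修改
--         for _ in range(3):
--             index = text.find(i, index + 1)
--             # find 沒找到字串，回傳 -1，找到則回傳第一個字的 index
--             if index != -1:
--                 index_dict[f"{i}_{str(index)}"] = index    # [('UK_32', 32), ('it engineer_44', 44)....]
--                 counter += 1
--             else:
--                 break
--     return counter, index_dict
-- ===== SOURCE B (Python) =====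
-- def nsw_idx(text, non_standard_words):
--     n = len(text)
--     occ = {}
--     for L in set(len(w) for w in non_standard_words):
--         bucket = set(w for w in non_standard_words if len(w) == L)
--         for p in range(n - L + 1):
--             chunk = text[p:p + L]
--             if chunk in bucket:
--                 occ.setdefault(chunk, []).append(p)
--     counter = 0
--     index_dict = {}
--     for w in non_standard_words:
--         first3 = occ.get(w, [])[:3]
--         for p in first3:
--             index_dict[f"{w}_{p}"] = p
--         counter += len(first3)
--     return counter, index_dict
-- ===== Notes on version B (the rewrite author's own statement) =====
-- stated objective: alternative
-- what changed: Instead of calling str.find up to 3 times per word (one text scan per word), B buckets the words by length, sweeps the text once per distinct word length matching each chunk against the bucket set to build a word->positions table, and then assembles the counter and dict from the table's first 3 positions per word; measured much faster on word-heavy inputs in probe runs but not uniformly, so no speed claim is made.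
import Mathlib
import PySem

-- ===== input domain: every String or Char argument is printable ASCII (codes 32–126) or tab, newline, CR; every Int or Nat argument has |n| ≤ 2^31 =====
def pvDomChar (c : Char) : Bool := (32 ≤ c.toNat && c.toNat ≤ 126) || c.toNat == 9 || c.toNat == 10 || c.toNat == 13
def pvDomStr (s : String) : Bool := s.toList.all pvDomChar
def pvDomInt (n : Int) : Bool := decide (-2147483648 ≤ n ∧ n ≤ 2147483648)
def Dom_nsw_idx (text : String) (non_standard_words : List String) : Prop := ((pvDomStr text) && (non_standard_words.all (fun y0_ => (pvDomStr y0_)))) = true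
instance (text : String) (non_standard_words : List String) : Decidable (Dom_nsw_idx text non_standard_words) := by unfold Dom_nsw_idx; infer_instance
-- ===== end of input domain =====

-- B replaces the per-word repeated str.find scans by one sweep of the text per distinct
-- word LENGTH (bucketing the words by length and testing each text chunk against the
-- bucket), then assembles the same counter/dict per word; equivalence of return values.

-- ===== PORT A =====
-- the f-string key f"{i}_{str(index)}"
def pvKey (w : List Char) (p : Int) : String := String.ofList (w ++ '_' :: PySem.Int.toChars p)

-- A's inner 'for _ in range(3)' loop with its break, searching from index+1 each round
def nswFindLoop (s w : List Char) (fuel : Nat) (index : Int) (counter : Int)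
    (d : PySem.Dict String Int) : Int × PySem.Dict String Int :=
  match fuel with
  | 0 => (counter, d)
  | fuel + 1 =>
    let idx := PySem.Chars.findFrom s w (index + 1)
    if idx != -1 then
      nswFindLoop s w fuel idx (counter + 1) (d.insert (pvKey w idx) idx)
    else (counter, d)

def nsw_idx (text : String) (non_standard_words : List String) : Int × (List (String × Int)) :=
  let r := non_standard_words.foldl
    (fun (st : Int × PySem.Dict String Int) i => nswFindLoop text.toList i.toList 3 (-1) st.1 st.2)
    (0, PySem.Dict.empty)
  (r.1, r.2.items)

-- ===== PORT B =====
-- phase 1 of Source B: for each distinct word length L, sweep the text once and record,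
-- per word of length L, the positions where it occurs (occ dict)
def nswOcc (text : String) (non_standard_words : List String) : PySem.Dict String (List Int) :=
  (PySem.Set.ofList (non_standard_words.map PySem.Str.len)).foldl
    (fun occ L =>
      let bucket : PySem.Set String :=
        PySem.Set.ofList (non_standard_words.filter (fun w => PySem.Str.len w == L))
      (PySem.List.pyRange 0 (PySem.Str.len text - L + 1)).foldl
        (fun (occ : PySem.Dict String (List Int)) p =>
          let chunk := PySem.Str.slice text (some p) (some (p + L))
          if PySem.Set.contains bucket chunk then occ.modify chunk [] (· ++ [p]) else occ)
        occ)
    PySem.Dict.empty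

def nsw_idx_alt (text : String) (non_standard_words : List String) : Int × (List (String × Int)) :=
  let occ := nswOcc text non_standard_words
  let r := non_standard_words.foldl
    (fun (st : Int × PySem.Dict String Int) w =>
      let first3 := (occ.getD w []).take 3
      (st.1 + (first3.length : Int),
       first3.foldl (fun d p => d.insert (pvKey w.toList p) p) st.2))
    (0, PySem.Dict.empty)
  (r.1, r.2.items)

-- ===== PRECONDITION & SPEC =====
def Spec_nsw_idx (text : String) (non_standard_words : List String) (out : Int × (List (String × Int))) : Prop := out = nsw_idx_alt text non_standard_words
instance (text : String) (non_standard_words : List String) (out : Int × (List (String × Int))) : Decidable (Spec_nsw_idx text non_standard_words out) := by unfold Spec_nsw_idx; infer_instance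

-- ===== CLAIM (what is proved, stated in full; the proofs are below) =====
def Claim_equal_nsw_idx : Prop := ∀ (text : String) (non_standard_words : List String), Dom_nsw_idx text non_standard_words → Spec_nsw_idx text non_standard_words (nsw_idx text non_standard_words)

-- ===== LEMMAS AND PROOFS =====

-- all positions (in increasing order) at which w occurs in s
def pvPos (s w : List Char) : List Int :=
  (PySem.List.pyRange 0 ((s.length : Int) - w.length + 1)).filter
    (fun p => decide (w <+: s.drop p.toNat))

lemma mem_pvPos {s w : List Char} {p : Int} :
    p ∈ pvPos s w ↔ (0 ≤ p ∧ p < (s.length : Int) - w.length + 1) ∧ w <+: s.drop p.toNat := by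
  rw [pvPos, List.mem_filter, PySem.List.mem_pyRange_one, decide_eq_true_eq]

lemma pyRange_zero_pairwise (t : Int) : (PySem.List.pyRange 0 t).Pairwise (· < ·) := by
  rcases (by omega : t ≤ 0 ∨ 0 < t) with h | h
  · have : PySem.List.pyRange 0 t = [] := by
      apply List.eq_nil_iff_forall_not_mem.2
      intro x hx
      rw [PySem.List.mem_pyRange_one] at hx
      omega
    simp [this]
  · have ht : t = ((t.toNat : Nat) : Int) := by omega
    rw [ht, PySem.List.pyRange_zero_natCast]
    exact List.pairwise_lt_range.map _ (by intro a b hab; exact_mod_cast hab)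

lemma pvPos_pairwise (s w : List Char) : (pvPos s w).Pairwise (· < ·) :=
  (pyRange_zero_pairwise _).sublist List.filter_sublist

lemma pvPos_nonneg {s w : List Char} {p : Int} (h : p ∈ pvPos s w) : 0 ≤ p :=
  (mem_pvPos.1 h).1.1

-- first element ≥ nothing of a sorted filter
lemma head_filter_sorted {l : List Int} (hl : l.Pairwise (· < ·)) {pred : Int → Bool} {r : Int}
    (hr : r ∈ l) (hpr : pred r = true) (hmin : ∀ p ∈ l, pred p = true → r ≤ p) (d : Int) :
    (l.filter pred).headD d = r := by
  induction l with
  | nil => simp at hr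
  | cons a t ih =>
    rcases List.pairwise_cons.1 hl with ⟨ha, ht⟩
    by_cases hpa : pred a = true
    · have hra : r ≤ a := hmin a (by simp) hpa
      rcases List.mem_cons.1 hr with rfl | hrt
      · simp [hpa]
      · exact absurd (ha r hrt) (by omega)
    · have hra : r ≠ a := fun h => hpa (h ▸ hpr)
      have hrt : r ∈ t := (List.mem_cons.1 hr).resolve_left hra
      rw [List.filter_cons_of_neg (by simp [hpa])]
      exact ih ht hrt (fun p hp hpp => hmin p (by simp [hp]) hpp)

lemma filter_ge_succ {l : List Int} (hl : l.Pairwise (· < ·)) {a p : Int} {rest : List Int}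
    (h : l.filter (fun x => decide (a ≤ x)) = p :: rest) :
    l.filter (fun x => decide (p + 1 ≤ x)) = rest := by
  induction l with
  | nil => simp at h
  | cons b t ih =>
    rcases List.pairwise_cons.1 hl with ⟨hb, ht⟩
    by_cases hab : a ≤ b
    · rw [List.filter_cons_of_pos (by simpa using hab)] at h
      injection h with hbp hrest
      rw [List.filter_cons_of_neg (by simp [hbp])]
      rw [List.filter_eq_self.2 (by intro x hx; have := hb x hx; simp; omega)]
      rw [← hrest, List.filter_eq_self.2 (by intro x hx; have := hb x hx; simp; omega)]
    · rw [List.filter_cons_of_neg (by simpa using hab)] at h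
      have hap : a ≤ p := by
        have : p ∈ t.filter (fun x => decide (a ≤ x)) := h ▸ List.mem_cons_self ..
        simpa using (List.mem_filter.1 this).2
      rw [List.filter_cons_of_neg (by simp; omega)]
      exact ih ht h

lemma findFrom_gt_len (s sub : List Char) (k : Int) (h : (s.length : Int) < k) :
    PySem.Chars.findFrom s sub k none = -1 := by
  simp only [PySem.Chars.findFrom]
  split_ifs <;> first | rfl | omega

-- CPython's find(sub, start) is the first recorded occurrence position ≥ start (or -1)
lemma findFrom_eq_head (s w : List Char) (start : Nat) (hst : start ≤ s.length + 1) :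
    PySem.Chars.findFrom s w (start : Int) none =
      ((pvPos s w).filter (fun p => decide ((start : Int) ≤ p))).headD (-1) := by
  rcases (by omega : start ≤ s.length ∨ s.length < start) with hle | hgt
  · by_cases hneg : PySem.Chars.findFrom s w (start : Int) none = -1
    · rw [hneg]
      have hnin : ¬ w <:+: s.drop start :=
        (PySem.Chars.findFrom_natCast_eq_neg_one_iff s w start hle).1 hneg
      have : (pvPos s w).filter (fun p => decide ((start : Int) ≤ p)) = [] := by
        apply List.filter_eq_nil_iff.2
        intro p hp hsp
        rcases mem_pvPos.1 hp with ⟨⟨h0, _⟩, hpre⟩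
        have hsp' : start ≤ p.toNat := by simp at hsp; omega
        apply hnin
        rw [← PySem.Chars.isIn_iff_infix, ← PySem.Chars.exists_prefix_drop_iff_isIn]
        refine ⟨p.toNat - start, ?_⟩
        rw [List.drop_drop]
        have heq : start + (p.toNat - start) = p.toNat := by omega
        rwa [heq]
      simp [this]
    · obtain ⟨h1, h2, h3⟩ := PySem.Chars.findFrom_natCast_spec s w start hle hneg
      set r := PySem.Chars.findFrom s w (start : Int) none with hr
      clear_value r
      have h5 : r ≤ (s.length : Int) := by
        rw [hr, PySem.Chars.findFrom_natCast s w start hle]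
        have h6 := PySem.Chars.find_le_length (s.drop start) w
        rw [List.length_drop] at h6
        split_ifs with h7
        · omega
        · omega
      have hr0 : 0 ≤ r := le_trans (by exact_mod_cast Nat.zero_le start) h1
      have hrlen : r.toNat + w.length ≤ s.length := by
        have h4 := h2.length_le
        rw [List.length_drop] at h4
        omega
      symm
      apply head_filter_sorted (pvPos_pairwise s w)
      · exact mem_pvPos.2 ⟨⟨hr0, by omega⟩, h2⟩
      · simpa using h1
      · intro p hp hsp
        rcases mem_pvPos.1 hp with ⟨⟨h0, _⟩, hpre⟩
        simp at hsp
        by_contra hlt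
        exact h3 p.toNat (by omega) (by omega) hpre
  · have hst' : start = s.length + 1 := by omega
    rw [findFrom_gt_len s w _ (by exact_mod_cast hgt)]
    have : (pvPos s w).filter (fun p => decide ((start : Int) ≤ p)) = [] := by
      apply List.filter_eq_nil_iff.2
      intro p hp hsp
      rcases mem_pvPos.1 hp with ⟨⟨h0, hlt⟩, _⟩
      simp at hsp
      omega
    simp [this]

-- A's fuelled find loop, characterised by the occurrence list
lemma nswFindLoop_eq (s w : List Char) :
    ∀ (fuel : Nat) (start : Nat), start ≤ s.length + 1 → ∀ (c : Int) (d : PySem.Dict String Int),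
      nswFindLoop s w fuel ((start : Int) - 1) c d =
        (c + (((((pvPos s w).filter (fun p => decide ((start : Int) ≤ p))).take fuel)).length : Int),
         ((((pvPos s w).filter (fun p => decide ((start : Int) ≤ p))).take fuel)).foldl
           (fun d p => d.insert (pvKey w p) p) d) := by
  intro fuel
  induction fuel with
  | zero => intro start hst c d; simp [nswFindLoop]
  | succ fuel ih =>
    intro start hst c d
    have hidx : (start : Int) - 1 + 1 = (start : Int) := by ring
    rcases hL : (pvPos s w).filter (fun p => decide ((start : Int) ≤ p)) with _ | ⟨p, rest⟩
    · have hf : PySem.Chars.findFrom s w ((start : Int)) none = -1 := by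
        rw [findFrom_eq_head s w start hst, hL]; rfl
      simp only [nswFindLoop]
      rw [hidx, hf]
      simp
    · have hpmem : p ∈ pvPos s w ∧ (start : Int) ≤ p := by
        have : p ∈ (pvPos s w).filter (fun p => decide ((start : Int) ≤ p)) := by
          rw [hL]; exact List.mem_cons_self ..
        have h2 := List.mem_filter.1 this
        exact ⟨h2.1, by simpa using h2.2⟩
      have hp0 : 0 ≤ p := pvPos_nonneg hpmem.1
      have hplen : p < (s.length : Int) - w.length + 1 := (mem_pvPos.1 hpmem.1).1.2
      have hf : PySem.Chars.findFrom s w ((start : Int)) none = p := by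
        rw [findFrom_eq_head s w start hst, hL]; rfl
      have hrest : (pvPos s w).filter (fun x => decide (((p.toNat + 1 : Nat) : Int) ≤ x)) = rest := by
        have h1 : (pvPos s w).filter (fun x => decide (p + 1 ≤ x)) = rest :=
          filter_ge_succ (pvPos_pairwise s w) hL
        rw [← h1]
        apply List.filter_congr
        intro x _
        simp; omega
      simp only [nswFindLoop]
      rw [hidx, hf]
      have hne : (p != -1) = true := by simp; omega
      rw [if_pos hne]
      have hstep := ih (p.toNat + 1) (by omega) (c + 1) (d.insert (pvKey w p) p)
      rw [hrest] at hstep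
      have hcast : ((p.toNat + 1 : Nat) : Int) - 1 = p := by omega
      rw [hcast] at hstep
      rw [hstep, List.take_succ_cons]
      refine Prod.ext ?_ ?_
      · simp [List.length_cons]; ring
      · simp [List.foldl_cons]

-- === B side: occ.getD w [] is exactly pvPos ===

lemma chunk_eq_iff (text w : String) (q : Nat) :
    (PySem.Str.slice text (some (q : Int)) (some ((q : Int) + (w.toList.length : Int))) == w) =
      decide (w.toList <+: text.toList.drop q) := by
  have hpm : (q : Int) + (w.toList.length : Int) = ((q + w.toList.length : Nat) : Int) := by
    push_cast; ring
  have key : (PySem.Str.slice text (some (q : Int)) (some ((q : Int) + (w.toList.length : Int))) = w) ↔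
      w.toList <+: text.toList.drop q := by
    rw [← String.toList_inj, PySem.Str.toList_slice, PySem.Chars.slice_eq_listSlice, hpm,
      PySem.List.slice_natCast, Nat.add_sub_cancel_left]
    exact ⟨fun h => List.prefix_iff_eq_take.2 h.symm, fun h => (List.prefix_iff_eq_take.1 h).symm⟩
  rw [Bool.eq_iff_iff, beq_iff_eq, decide_eq_true_eq]
  exact key

-- the zeta-reduced per-length sweep of nswOcc (proof-side name for its foldl step)
def pvStep (text : String) (ws : List String) :
    PySem.Dict String (List Int) → Int → PySem.Dict String (List Int) :=
  fun occ L =>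
    (PySem.List.pyRange 0 (PySem.Str.len text - L + 1)).foldl
      (fun (occ : PySem.Dict String (List Int)) p =>
        if PySem.Set.contains (PySem.Set.ofList (ws.filter (fun w => PySem.Str.len w == L)))
            (PySem.Str.slice text (some p) (some (p + L)))
        then occ.modify (PySem.Str.slice text (some p) (some (p + L))) [] (· ++ [p]) else occ)
      occ

lemma nswOcc_eq (text : String) (ws : List String) :
    nswOcc text ws = (PySem.Set.ofList (ws.map PySem.Str.len)).foldl (pvStep text ws) PySem.Dict.empty := rfl

-- the length-ℓ sweep appends this word's occurrence list iff ℓ is its length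
lemma sweep_getD (text : String) (ws : List String) (ℓ : Nat) (w : String) (hw : w ∈ ws)
    (occ : PySem.Dict String (List Int)) :
    (pvStep text ws occ ((ℓ : Nat) : Int)).getD w [] =
      occ.getD w [] ++
        (if ((w.toList.length : Int)) = ((ℓ : Nat) : Int) then pvPos text.toList w.toList else []) := by
  unfold pvStep
  rw [PySem.List.foldl_ite_eq_foldl_filter]
  rw [← List.foldl_map
    (f := fun p : Int => (PySem.Str.slice text (some p) (some (p + ((ℓ : Nat) : Int))), p))
    (g := fun (d : PySem.Dict String (List Int)) (q : String × Int) => d.modify q.1 [] (· ++ [q.2]))]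
  rw [PySem.Dict.getD_foldl_modify_append]
  congr 1
  rw [List.filter_map, List.map_map]
  have hid : ((fun (x : String × Int) => x.2) ∘
      fun p : Int => (PySem.Str.slice text (some p) (some (p + ((ℓ : Nat) : Int))), p)) = id := rfl
  rw [hid, List.map_id, List.filter_filter]
  simp only [Function.comp_def]
  by_cases hlen : ((w.toList.length : Int)) = ((ℓ : Nat) : Int)
  · rw [if_pos hlen]
    have hm : w.toList.length = ℓ := by exact_mod_cast hlen
    subst hm
    unfold pvPos
    rw [show PySem.Str.len text = ((text.toList.length : Nat) : Int) from PySem.Str.len_eq text]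
    apply List.filter_congr
    intro p hp
    rw [PySem.List.mem_pyRange_one] at hp
    have hp' : ((p.toNat : Nat) : Int) = p := by omega
    have hc := chunk_eq_iff text w p.toNat
    rw [hp'] at hc
    by_cases hpre : w.toList <+: text.toList.drop p.toNat
    · have hsl : PySem.Str.slice text (some p) (some (p + (w.toList.length : Int))) = w := by
        have := hc
        rw [decide_eq_true hpre] at this
        exact beq_iff_eq.1 this
      have hcb : PySem.Set.contains
          (PySem.Set.ofList (ws.filter (fun w' => PySem.Str.len w' == (w.toList.length : Int))))
          (PySem.Str.slice text (some p) (some (p + (w.toList.length : Int)))) = true := by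
        rw [hsl, PySem.Set.contains_iff, PySem.Set.mem_ofList, List.mem_filter]
        exact ⟨hw, by simp [PySem.Str.len_eq]⟩
      rw [hc, hcb]
      simp [hpre]
    · rw [hc, decide_eq_false hpre, Bool.false_and]
  · rw [if_neg hlen]
    apply List.filter_eq_nil_iff.2
    intro p hp hcond
    rw [PySem.List.mem_pyRange_one] at hp
    rw [PySem.Str.len_eq] at hp
    obtain ⟨q, rfl⟩ : ∃ q : Nat, p = ((q : Nat) : Int) := ⟨p.toNat, by omega⟩
    rw [Bool.and_eq_true] at hcond
    have hsl : PySem.Str.slice text (some ((q : Nat) : Int))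
        (some (((q : Nat) : Int) + ((ℓ : Nat) : Int))) = w := by
      simpa using beq_iff_eq.1 hcond.1
    apply hlen
    have hlist : (PySem.Str.slice text (some ((q : Nat) : Int))
        (some (((q : Nat) : Int) + ((ℓ : Nat) : Int)))).toList = w.toList := by
      rw [hsl]
    have hpm : ((q : Nat) : Int) + ((ℓ : Nat) : Int) = (((q + ℓ : Nat)) : Int) := by push_cast; ring
    rw [PySem.Str.toList_slice, PySem.Chars.slice_eq_listSlice, hpm,
      PySem.List.slice_natCast, Nat.add_sub_cancel_left] at hlist
    have hlen2 := congrArg List.length hlist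
    rw [List.length_take, List.length_drop] at hlen2
    have hqb : ℓ ≤ text.toList.length - q := by omega
    rw [min_eq_left hqb] at hlen2
    omega

lemma occ_fold_getD (text : String) (ws : List String) (w : String) (hw : w ∈ ws) :
    ∀ (lengths : List Int), lengths.Nodup → (∀ L ∈ lengths, ∃ ℓ : Nat, L = ((ℓ : Nat) : Int)) →
      ∀ occ : PySem.Dict String (List Int),
        ((lengths.foldl (pvStep text ws) occ).getD w []) =
          occ.getD w [] ++
            (if ((w.toList.length : Int)) ∈ lengths then pvPos text.toList w.toList else []) := by
  intro lengths
  induction lengths with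
  | nil => intro _ _ occ; simp
  | cons L ls ih =>
    intro hnd hcast occ
    obtain ⟨ℓ, rfl⟩ := hcast L (List.mem_cons_self ..)
    rw [List.foldl_cons,
      ih (List.Nodup.of_cons hnd) (fun L' hL' => hcast L' (List.mem_cons_of_mem _ hL')) _,
      sweep_getD text ws ℓ w hw occ]
    by_cases hlen : ((w.toList.length : Int)) = ((ℓ : Nat) : Int)
    · have hnin : ((w.toList.length : Int)) ∉ ls := by
        rw [hlen]
        exact (List.nodup_cons.1 hnd).1
      rw [if_pos hlen, if_neg hnin, if_pos (by rw [hlen]; exact List.mem_cons_self ..)]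
      simp
    · rw [if_neg hlen]
      by_cases hin : ((w.toList.length : Int)) ∈ ls
      · rw [if_pos hin, if_pos (List.mem_cons_of_mem _ hin)]
        simp
      · rw [if_neg hin, if_neg (fun hmem => (List.mem_cons.1 hmem).elim hlen hin)]
        simp

lemma occ_getD (text : String) (non_standard_words : List String) (w : String)
    (hw : w ∈ non_standard_words) :
    (nswOcc text non_standard_words).getD w [] = pvPos text.toList w.toList := by
  rw [nswOcc_eq]
  rw [occ_fold_getD text non_standard_words w hw _
    (PySem.Set.nodup_ofList _)
    (by
      intro L hL
      rw [PySem.Set.mem_ofList] at hL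
      obtain ⟨w', _, rfl⟩ := List.mem_map.1 hL
      exact ⟨w'.toList.length, (PySem.Str.len_eq w').symm ▸ rfl⟩)
    PySem.Dict.empty]
  rw [if_pos (by
    rw [PySem.Set.mem_ofList]
    exact List.mem_map.2 ⟨w, hw, (PySem.Str.len_eq w)⟩)]
  simp [pysem]

-- per-word step equality
lemma step_eq (text : String) (non_standard_words : List String) (w : String)
    (hw : w ∈ non_standard_words) (c : Int) (d : PySem.Dict String Int) :
    nswFindLoop text.toList w.toList 3 (-1) c d =
      (c + (((((nswOcc text non_standard_words).getD w []).take 3)).length : Int),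
       ((((nswOcc text non_standard_words).getD w []).take 3)).foldl
         (fun d p => d.insert (pvKey w.toList p) p) d) := by
  have h0 : (-1 : Int) = ((0 : Nat) : Int) - 1 := by norm_num
  have hfilter : (pvPos text.toList w.toList).filter (fun p => decide (((0 : Nat) : Int) ≤ p)) =
      pvPos text.toList w.toList := by
    apply List.filter_eq_self.2
    intro p hp
    simpa using pvPos_nonneg hp
  rw [h0, nswFindLoop_eq text.toList w.toList 3 0 (by omega) c d, hfilter, occ_getD text non_standard_words w hw]

-- ===== VERDICT (by name: the statement is the Claim_ definition above) =====
theorem nsw_idx_spec : Claim_equal_nsw_idx := by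
  intro text non_standard_words _
  unfold Spec_nsw_idx nsw_idx nsw_idx_alt
  have : non_standard_words.foldl
      (fun (st : Int × PySem.Dict String Int) i => nswFindLoop text.toList i.toList 3 (-1) st.1 st.2)
      (0, PySem.Dict.empty) =
    non_standard_words.foldl
      (fun (st : Int × PySem.Dict String Int) w =>
        let first3 := ((nswOcc text non_standard_words).getD w []).take 3
        (st.1 + (first3.length : Int),
         first3.foldl (fun d p => d.insert (pvKey w.toList p) p) st.2))
      (0, PySem.Dict.empty) := by
    apply PySem.List.foldl_congr_mem
    intro st w hw
    exact step_eq text non_standard_words w hw st.1 st.2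
  rw [this]
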